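-- pv_equiv track=rewrite | github.com/SalahBelila/lfi_1 | checker.py | analyze_clause
-- ===== SOURCE A (Python) =====
-- def analyze_clause(clause):
--     clause = clause.replace(' ', '').replace(')', '').replace('(', '').split('+')
--     for c in clause:
--         c = list(c)
--         if len(c) == 2:
--             if c[0] == '-' and ((64 < ord(c[1]) < 91) or (96 < ord(c[1]) < 123)):
--                 continue
--             else:
--                 return False
--         elif len(c) == 1:
--             if (64 < ord(c[0]) < 91) or (96 < ord(c[0]) < 123):
--                 continue
--             else:
--                 return False
--         else:
--             return False
--     return True
-- ===== SOURCE B (Python) =====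
-- def analyze_clause(clause):
--     cleaned = clause.replace(' ', '').replace(')', '').replace('(', '')
--     # one-pass DFA over the cleaned string: 0 = start of token, 1 = after '-', 2 = after letter
--     state = 0
--     for ch in cleaned:
--         if state == 0:
--             if ch == '-':
--                 state = 1
--             elif ('A' <= ch <= 'Z') or ('a' <= ch <= 'z'):
--                 state = 2
--             else:
--                 return False
--         elif state == 1:
--             if ('A' <= ch <= 'Z') or ('a' <= ch <= 'z'):
--                 state = 2
--             else:
--                 return False
--         else:
--             if ch == '+':
--                 state = 0
--             else:
--                 return False
--     return state == 2
-- ===== Notes on version B (the rewrite author's own statement) =====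
-- stated objective: alternative
-- what changed: Replaced the split-on-plus token list and per-token length/ord check loop with a single-pass three-state DFA over the cleaned string, so no token list is ever built.
import Mathlib
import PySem

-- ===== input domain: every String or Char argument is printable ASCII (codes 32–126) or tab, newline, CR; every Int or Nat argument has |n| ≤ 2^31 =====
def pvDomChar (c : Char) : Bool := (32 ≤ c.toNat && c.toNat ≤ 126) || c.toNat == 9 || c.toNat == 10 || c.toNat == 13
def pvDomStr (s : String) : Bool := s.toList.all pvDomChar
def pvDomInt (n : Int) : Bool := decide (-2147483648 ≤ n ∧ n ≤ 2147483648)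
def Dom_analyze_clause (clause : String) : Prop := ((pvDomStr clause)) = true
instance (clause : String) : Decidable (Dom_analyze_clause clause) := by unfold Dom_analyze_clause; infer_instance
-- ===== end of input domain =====

set_option maxRecDepth 8000


-- B replaces A's split-on-plus tokenization + per-token ord-range loop by a one-pass three-state DFA (alternative decomposition, same cost).

-- ===== PORT A =====
-- the ord-range letter test (64 < ord < 91) or (96 < ord < 123), exactly as A writes it
def pvLetterA (c : Char) : Bool :=
  decide ((64 < c.toNat ∧ c.toNat < 91) ∨ (96 < c.toNat ∧ c.toNat < 123))

-- A's for-loop over the split tokens, with its early returns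
def pvLoopA : List (List Char) → Bool
  | [] => true
  | t :: rest =>
    match t with
    | [a, b] => if a = '-' ∧ pvLetterA b = true then pvLoopA rest else false
    | [a] => if pvLetterA a = true then pvLoopA rest else false
    | _ => false

def analyze_clause (clause : String) : Bool :=
  -- clause.replace(' ','').replace(')','').replace('(','').split('+')
  let cleaned := PySem.Chars.replace (PySem.Chars.replace
      (PySem.Chars.replace clause.toList [' '] []) [')'] []) ['('] []
  pvLoopA (PySem.Chars.splitOn cleaned ['+'])

-- ===== PORT B =====
-- B's letter test: ('A' <= ch <= 'Z') or ('a' <= ch <= 'z')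
def pvLetterB (c : Char) : Bool :=
  decide (('A' ≤ c ∧ c ≤ 'Z') ∨ ('a' ≤ c ∧ c ≤ 'z'))

-- B's for-loop: state 0 = start of token, 1 = after '-', 2 = after letter
def pvDfaB : List Char → Nat → Bool
  | [], s => s == 2
  | c :: rest, s =>
    if s == 0 then
      if c = '-' then pvDfaB rest 1
      else if pvLetterB c then pvDfaB rest 2
      else false
    else if s == 1 then
      if pvLetterB c then pvDfaB rest 2 else false
    else
      if c = '+' then pvDfaB rest 0 else false

def analyze_clause_alt (clause : String) : Bool :=
  let cleaned := PySem.Chars.replace (PySem.Chars.replace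
      (PySem.Chars.replace clause.toList [' '] []) [')'] []) ['('] []
  pvDfaB cleaned 0

-- ===== PRECONDITION & SPEC =====
def Spec_analyze_clause (clause : String) (out : Bool) : Prop := out = analyze_clause_alt clause
instance (clause : String) (out : Bool) : Decidable (Spec_analyze_clause clause out) := by unfold Spec_analyze_clause; infer_instance

-- ===== CLAIM (what is proved, stated in full; the proofs are below) =====
def Claim_equal_analyze_clause : Prop := ∀ (clause : String), Dom_analyze_clause clause → Spec_analyze_clause clause (analyze_clause clause)

-- ===== LEMMAS AND PROOFS =====

theorem pvLetter_eq (c : Char) : pvLetterA c = pvLetterB c := by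
  simp only [pvLetterA, pvLetterB, decide_eq_decide, Char.le_def, UInt32.le_iff_toNat_le]
  have h : c.toNat = c.val.toNat := rfl
  have hA : ('A' : Char).val.toNat = 65 := rfl
  have hZ : ('Z' : Char).val.toNat = 90 := rfl
  have ha : ('a' : Char).val.toNat = 97 := rfl
  have hz : ('z' : Char).val.toNat = 122 := rfl
  rw [hA, hZ, ha, hz]; omega

-- validity of one token, as A's branch tests read
def pvTokValid : List Char → Bool
  | [a, b] => (decide (a = '-')) && pvLetterA b
  | [a] => pvLetterA a
  | _ => false

-- DFA state corresponding to a (reversed) partial token; none = no completion is valid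
def pvCurState : List Char → Option Nat
  | [] => some 0
  | [c] => if c = '-' then some 1 else if pvLetterB c then some 2 else none
  | [c, d] => if d = '-' ∧ pvLetterB c = true then some 2 else none
  | _ => none

def pvMid (cur l : List Char) : Bool :=
  match pvCurState cur with
  | none => false
  | some s => pvDfaB l s

-- one-step reductions of the DFA from each of its three states
theorem pvS0 (c : Char) (l : List Char) :
    pvDfaB (c :: l) 0 = if c = '-' then pvDfaB l 1 else if pvLetterB c then pvDfaB l 2 else false := rfl
theorem pvS1 (c : Char) (l : List Char) :
    pvDfaB (c :: l) 1 = if pvLetterB c then pvDfaB l 2 else false := rfl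
theorem pvS2 (c : Char) (l : List Char) :
    pvDfaB (c :: l) 2 = if c = '+' then pvDfaB l 0 else false := rfl

theorem pvLoopA_all (ts : List (List Char)) : pvLoopA ts = ts.all pvTokValid := by
  induction ts with
  | nil => rfl
  | cons t rest ih =>
    match t with
    | [] => simp [pvLoopA, pvTokValid]
    | [a] =>
      simp only [pvLoopA, List.all_cons, ih, pvTokValid]
      by_cases h : pvLetterA a = true
      · simp [h]
      · simp [h]
    | [a, b] =>
      simp only [pvLoopA, List.all_cons, ih, pvTokValid]
      by_cases h : a = '-' ∧ pvLetterA b = true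
      · simp [h]
      · rw [if_neg h]
        rcases Decidable.em (a = '-') with h1 | h1
        · have h2 : pvLetterA b = false := by
            rcases Decidable.em (pvLetterA b = true) with h2 | h2
            · exact absurd ⟨h1, h2⟩ h
            · simpa using h2
          simp [h2]
        · simp [h1]
    | _ :: _ :: _ :: _ => simp [pvLoopA, pvTokValid]

theorem pvValid_iff (cur : List Char) : pvTokValid cur.reverse = (pvCurState cur == some 2) := by
  match cur with
  | [] => rfl
  | [c] =>
    show pvLetterA c = _
    rw [pvLetter_eq]
    by_cases h : c = '-'
    · subst h; simp [pvCurState, show pvLetterB '-' = false from rfl]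
    · simp only [pvCurState, if_neg h]
      by_cases hl : pvLetterB c = true
      · simp [hl]
      · simp [hl]
  | [c, d] =>
    show ((decide (d = '-')) && pvLetterA c) = _
    rw [pvLetter_eq]
    by_cases h : d = '-' <;> by_cases hl : pvLetterB c = true <;>
      simp [pvCurState, h, hl]
  | c :: d :: e :: rest =>
    have h1 : (c :: d :: e :: rest).reverse = rest.reverse ++ [e, d, c] := by simp
    have h2 : pvCurState (c :: d :: e :: rest) = none := rfl
    rw [h1, h2]
    match hm : rest.reverse ++ [e, d, c] with
    | [] => simp at hm
    | [_] => have := congrArg List.length hm; simp at this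
    | [_, _] => have := congrArg List.length hm; simp at this
    | _ :: _ :: _ :: _ => simp [pvTokValid]

theorem pvMid_nil (cur : List Char) : pvMid cur [] = (pvCurState cur == some 2) := by
  unfold pvMid
  match pvCurState cur with
  | none => rfl
  | some s =>
    show (s == 2) = _
    rfl

theorem pvMid_plus (cur l : List Char) :
    pvMid cur ('+' :: l) = ((pvCurState cur == some 2) && pvMid [] l) := by
  have hplus : pvLetterB '+' = false := rfl
  have hpm : ¬ ('+' : Char) = '-' := by decide
  match cur with
  | [] => simp [pvMid, pvCurState, pvS0, hplus, hpm]
  | [c] =>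
    by_cases h : c = '-'
    · subst h; simp [pvMid, pvCurState, pvS1, hplus]
    · by_cases hl : pvLetterB c = true
      · simp [pvMid, pvCurState, h, hl, pvS2]
      · simp [pvMid, pvCurState, h, hl]
  | [c, d] =>
    by_cases h : d = '-' ∧ pvLetterB c = true
    · simp [pvMid, pvCurState, h, pvS2]
    · simp [pvMid, pvCurState, h]
  | _ :: _ :: _ :: _ => simp [pvMid, pvCurState]

theorem pvMid_step (cur : List Char) (c : Char) (l : List Char) (hc : ¬ c = '+') :
    pvMid cur (c :: l) = pvMid (c :: cur) l := by
  match cur with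
  | [] =>
    by_cases h : c = '-'
    · simp [pvMid, pvCurState, pvS0, h]
    · by_cases hl : pvLetterB c = true
      · simp [pvMid, pvCurState, pvS0, h, hl]
      · simp [pvMid, pvCurState, pvS0, h, hl]
  | [d] =>
    by_cases h : d = '-'
    · subst h
      by_cases hl : pvLetterB c = true
      · simp [pvMid, pvCurState, pvS1, hl]
      · simp [pvMid, pvCurState, pvS1, hl]
    · by_cases hl : pvLetterB d = true
      · simp [pvMid, pvCurState, pvS2, h, hl, hc]
      · simp [pvMid, pvCurState, h, hl]
  | [d, e] =>
    by_cases h : e = '-' ∧ pvLetterB d = true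
    · simp [pvMid, pvCurState, h, pvS2, hc]
    · simp [pvMid, pvCurState, h]
  | _ :: _ :: _ :: _ => simp [pvMid, pvCurState]

theorem pvGo_cons (n : Nat) (c : Char) (rest cur : List Char) (acc : List (List Char)) :
    PySem.Chars.splitOn.go ['+'] (n+1) (c :: rest) cur acc =
      if c = '+' then PySem.Chars.splitOn.go ['+'] n rest [] (cur.reverse :: acc)
      else PySem.Chars.splitOn.go ['+'] n rest (c :: cur) acc := by
  by_cases h : c = '+'
  · subst h; rw [PySem.Chars.splitOn.go]; simp [List.isPrefixOf]
  · rw [PySem.Chars.splitOn.go]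
    simp [List.isPrefixOf, h, show ¬ ('+' = c) from fun hh => h hh.symm]

theorem pvGo_nil (n : Nat) (cur : List Char) (acc : List (List Char)) :
    PySem.Chars.splitOn.go ['+'] (n+1) [] cur acc = (cur.reverse :: acc).reverse := by
  rw [PySem.Chars.splitOn.go]; simp

theorem pvMain (fuel : Nat) : ∀ (l : List Char), l.length < fuel →
    ∀ (cur : List Char) (acc : List (List Char)),
    pvLoopA (PySem.Chars.splitOn.go ['+'] fuel l cur acc) =
      (pvLoopA acc.reverse && pvMid cur l) := by
  induction fuel with
  | zero => intro l h; omega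
  | succ n ih =>
    intro l hl cur acc
    match l with
    | [] =>
      rw [pvGo_nil, pvLoopA_all, pvLoopA_all]
      have h1 : ((cur.reverse :: acc).reverse : List (List Char)) = acc.reverse ++ [cur.reverse] := by simp
      rw [h1, List.all_append, pvMid_nil, ← pvValid_iff]
      simp [pvTokValid]
    | c :: rest =>
      rw [pvGo_cons]
      have hrest : rest.length < n := by simp at hl; omega
      by_cases hc : c = '+'
      · rw [if_pos hc, ih rest hrest, pvLoopA_all, pvLoopA_all]
        have h1 : ((cur.reverse :: acc).reverse : List (List Char)) = acc.reverse ++ [cur.reverse] := by simp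
        rw [h1, List.all_append, hc, pvMid_plus, ← pvValid_iff]
        simp [pvTokValid, Bool.and_assoc]
      · rw [if_neg hc, ih rest hrest, pvMid_step cur c rest hc]

-- ===== VERDICT (by name: the statement is the Claim_ definition above) =====
theorem analyze_clause_spec : Claim_equal_analyze_clause := by
  intro clause _
  unfold Spec_analyze_clause analyze_clause analyze_clause_alt
  simp only [PySem.Chars.splitOn]
  rw [pvMain _ _ (by omega)]
  simp [pvLoopA, pvMid, pvCurState]
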